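-- pv_equiv track=rewrite | github.com/Klaudia1303/student_code_analysis | Progetto-tirocinio2024/data/student_data/2058863_Deda/LabPython08/A_Ex8.py | A_Ex8
-- ===== SOURCE A (Python) =====
-- def A_Ex8(l):
--     l1=list(l)
--     g=set()
--     for i in range(len(l1)):
--         l2=list(l1[i])
--         for j in range(len(l2)):
--             x=l2[j]
--             conta=0
--             for k in range(len(l1)):
--                 f=l[k]
--                 if (x in f) and (x not in g):
--                     conta+=1
--                 if (x in f) and (x in g):
--                     g.remove(x)
--                     break
--                 if (x not in g) and conta==1:
--                     g.add(x)
--     return g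
-- ===== SOURCE B (Python) =====
-- def A_Ex8(l):
--     # One pass: for every element keep (owner list index or -1 if it occurs in
--     # several lists, occurrence count); result = elements owned by a single
--     # list with an odd count.
--     info = {}
--     for i, sub in enumerate(l):
--         for x in sub:
--             owner, cnt = info.pop(x, (i, 0))
--             info[x] = (i if owner == i else -1, cnt + 1)
--     return {x for x, (owner, cnt) in info.items() if owner != -1 and cnt % 2 == 1}
-- ===== Notes on version B (the rewrite author's own statement) =====
-- stated objective: faster
-- what changed: Replaces the triple nested loop with repeated membership scans and set toggling by a single pass that records, per element, its owning sublist (or -1 if several) and its occurrence count in one dict, then filters.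
import Mathlib
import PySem

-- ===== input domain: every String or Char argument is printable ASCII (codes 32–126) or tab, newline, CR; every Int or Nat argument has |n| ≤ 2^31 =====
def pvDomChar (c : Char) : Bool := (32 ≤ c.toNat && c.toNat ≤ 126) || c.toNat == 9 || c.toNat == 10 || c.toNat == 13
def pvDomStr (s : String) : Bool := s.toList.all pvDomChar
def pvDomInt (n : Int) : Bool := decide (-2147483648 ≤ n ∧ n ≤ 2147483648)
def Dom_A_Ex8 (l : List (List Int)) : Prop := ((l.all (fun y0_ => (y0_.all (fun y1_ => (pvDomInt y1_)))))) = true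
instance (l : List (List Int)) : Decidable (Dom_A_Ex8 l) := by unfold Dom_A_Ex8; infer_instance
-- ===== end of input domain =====

-- B replaces A's triple nested membership-scanning loops by a single pass keeping
-- one dict entry (owning sublist index or -1, occurrence count) per element.

-- ===== PORT A =====
-- the inner 'for k in range(len(l1)): f = l[k] …' loop of A, with its break;
-- 'g.remove(x)' is ported as Set.discard: the guard 'x in f and x in g'
-- guarantees membership, so remove never raises and discard is exact there.
def pvInnerA (x : Int) (ks : List (List Int)) (g : PySem.Set Int) (conta : Int) : PySem.Set Int :=
  match ks with
  | [] => g
  | f :: rest =>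
    let conta := if f.contains x && !(PySem.Set.contains g x) then conta + 1 else conta
    if f.contains x && PySem.Set.contains g x then
      PySem.Set.discard g x            -- g.remove(x); break
    else
      let g := if !(PySem.Set.contains g x) && conta == 1 then PySem.Set.add g x else g
      pvInnerA x rest g conta

def A_Ex8 (l : List (List Int)) : List Int :=
  -- l1 = list(l); for i …: l2 = list(l1[i]); for j …: x = l2[j]; inner loop over l
  l.foldl (fun g l2 => l2.foldl (fun g x => pvInnerA x l g 0) g) PySem.Set.empty

-- ===== PORT B =====
def A_Ex8_alt (l : List (List Int)) : List Int :=
  let info :=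
    (PySem.List.enumerate l).foldl (fun info p =>
      p.2.foldl (fun (info : PySem.Dict Int (Int × Int)) x =>
        -- owner, cnt = info.pop(x, (i, 0)); info[x] = (i if owner == i else -1, cnt + 1)
        let oc := (PySem.Dict.get? info x).getD (p.1, 0)
        let info := PySem.Dict.erase info x
        PySem.Dict.insert info x (if oc.1 == p.1 then p.1 else -1, oc.2 + 1)) info)
      PySem.Dict.empty
  (PySem.Dict.items info).foldl (fun s pc =>
      if pc.2.1 != -1 && PySem.Int.mod pc.2.2 2 == 1 then PySem.Set.add s pc.1 else s)
    PySem.Set.empty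

-- ===== PRECONDITION & SPEC =====
def Spec_A_Ex8 (l : List (List Int)) (out : List Int) : Prop := out = A_Ex8_alt l
instance (l : List (List Int)) (out : List Int) : Decidable (Spec_A_Ex8 l out) := by unfold Spec_A_Ex8; infer_instance

-- ===== CLAIM (what is proved, stated in full; the proofs are below) =====
def Claim_equal_A_Ex8 : Prop := ∀ (l : List (List Int)), Dom_A_Ex8 l → Spec_A_Ex8 l (A_Ex8 l)

-- ===== LEMMAS AND PROOFS =====

-- number of sublists of l containing x ('how many f with x in f')
def pvCl (l : List (List Int)) (x : Int) : Nat := l.countP (fun f => f.contains x)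

-- move-to-end update and 'elements in last-occurrence order'
def pvUpd (acc : List Int) (x : Int) : List Int := acc.filter (fun y => !(y == x)) ++ [x]

def pvLastOrder (p : List Int) : List Int := p.foldl pvUpd []

-- the qualifying predicate after processing occurrence list p
def pvQual (l : List (List Int)) (p : List Int) (x : Int) : Bool :=
  (pvCl l x == 1) && (p.count x % 2 == 1)

-- canonical value of A's accumulator after the occurrence prefix p
def pvA (l : List (List Int)) (p : List Int) : List Int :=
  (pvLastOrder p).filter (pvQual l p)

-- B's per-occurrence dict step, on (list index, element) pairs
def pvStepB (info : PySem.Dict Int (Int × Int)) (q : Int × Int) : PySem.Dict Int (Int × Int) :=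
  let oc := (PySem.Dict.get? info q.2).getD (q.1, 0)
  let info := PySem.Dict.erase info q.2
  PySem.Dict.insert info q.2 (if oc.1 == q.1 then q.1 else -1, oc.2 + 1)

-- the flattened, index-annotated input starting at index n
def pvAnn (l : List (List Int)) (n : Int) : List (Int × Int) :=
  (PySem.List.enumerate l n).flatMap (fun p => p.2.map (fun x => (p.1, x)))

-- the list indices at which x occurs, in order
def pvIdxs (q : List (Int × Int)) (x : Int) : List Int :=
  (q.filter (fun p => p.2 == x)).map Prod.fst

-- the owner B's dict records for x after processing q
def pvOwner (q : List (Int × Int)) (x : Int) : Int :=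
  match pvIdxs q x with
  | [] => 0
  | i :: rest => if rest.all (fun j => j == i) then i else -1

lemma pv_foldl_flatten {α β : Type} (f : β → α → β) (l : List (List α)) (g : β) :
    l.foldl (fun g sub => sub.foldl f g) g = (l.flatMap id).foldl f g := by
  induction l generalizing g with
  | nil => rfl
  | cons sub rest ih => simp [List.foldl_append, ih]

lemma pvInnerA_of_mem (x : Int) (ks : List (List Int)) (g : List Int) (c : Int)
    (hg : x ∈ g) :
    pvInnerA x ks g c =
      if ks.countP (fun f => f.contains x) = 0 then g
      else g.filter (fun y => !(y == x)) := by
  induction ks generalizing c with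
  | nil => simp [pvInnerA]
  | cons f rest ih =>
    have hc : PySem.Set.contains g x = true := by
      simp [PySem.Set.contains, List.contains_iff_mem, hg]
    by_cases hf : f.contains x = true
    · simp only [pvInnerA, hf, hc, Bool.not_true, Bool.and_false, Bool.and_true,
        if_false, if_true]
      have h1 : List.countP (fun f => f.contains x) (f :: rest)
          = List.countP (fun f => f.contains x) rest + 1 := List.countP_cons_of_pos hf
      rw [if_neg (by omega)]
      rfl
    · have hf' : f.contains x = false := by simpa using hf
      simp only [pvInnerA, hf', hc, Bool.false_and, Bool.not_true, Bool.and_false,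
        if_false]
      have h1 : List.countP (fun f => f.contains x) (f :: rest)
          = List.countP (fun f => f.contains x) rest := List.countP_cons_of_neg (by simpa using hf')
      rw [h1]
      exact ih c

lemma pv_filter_ne_of_not_mem (s : List Int) (x : Int) (h : x ∉ s) :
    s.filter (fun y => !(y == x)) = s := by
  apply List.filter_eq_self.mpr
  intro y hy
  have : y ≠ x := fun h' => h (h' ▸ hy)
  simp [this]

lemma pvInnerA_of_not_mem (x : Int) (ks : List (List Int)) (g : List Int)
    (hg : x ∉ g) :
    pvInnerA x ks g 0 =
      if ks.countP (fun f => f.contains x) = 1 then g ++ [x] else g := by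
  induction ks with
  | nil => simp [pvInnerA]
  | cons f rest ih =>
    have hc : PySem.Set.contains g x = false := by
      simp [PySem.Set.contains, List.contains_iff_mem, hg]
    by_cases hf : f.contains x = true
    · have hmem : x ∈ g ++ [x] := by simp
      have hadd : PySem.Set.add g x = g ++ [x] := PySem.Set.add_of_not_mem hg
      have hfil : (g ++ [x]).filter (fun y => !(y == x)) = g := by
        rw [List.filter_append, pv_filter_ne_of_not_mem g x hg]
        simp
      simp only [pvInnerA, hf, hc, Bool.not_false, Bool.and_true, Bool.true_and,
        Bool.and_false, if_true, if_false]
      rw [if_neg (by simp), if_pos (by decide), hadd,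
        pvInnerA_of_mem x rest (g ++ [x]) _ hmem]
      have h1 : List.countP (fun f => f.contains x) (f :: rest)
          = List.countP (fun f => f.contains x) rest + 1 := List.countP_cons_of_pos hf
      rw [h1]
      by_cases hr : rest.countP (fun f => f.contains x) = 0
      · rw [if_pos hr, if_pos (by omega)]
      · rw [if_neg hr, if_neg (by omega), hfil]
    · have hf' : f.contains x = false := by simpa using hf
      simp only [pvInnerA, hf', hc, Bool.false_and, Bool.and_false, if_false]
      have h1 : List.countP (fun f => f.contains x) (f :: rest)
          = List.countP (fun f => f.contains x) rest := List.countP_cons_of_neg (by simpa using hf')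
      rw [if_neg (by decide), h1]
      exact ih

lemma pvLastOrder_append (p : List Int) (x : Int) :
    pvLastOrder (p ++ [x]) = (pvLastOrder p).filter (fun y => !(y == x)) ++ [x] := by
  simp [pvLastOrder, List.foldl_append, pvUpd]

lemma mem_pvLastOrder (p : List Int) (x : Int) : x ∈ pvLastOrder p ↔ x ∈ p := by
  induction p using List.reverseRecOn with
  | nil => simp [pvLastOrder]
  | append_singleton p y ih =>
    rw [pvLastOrder_append]
    by_cases hxy : x = y
    · subst hxy; simp
    · simp [List.mem_filter, ih, hxy, beq_eq_false_iff_ne.mpr hxy]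

lemma nodup_pvLastOrder (p : List Int) : (pvLastOrder p).Nodup := by
  induction p using List.reverseRecOn with
  | nil => simp [pvLastOrder]
  | append_singleton p y ih =>
    rw [pvLastOrder_append]
    refine List.Nodup.append (ih.filter _) (List.nodup_singleton y) ?_
    intro a ha hb
    simp only [List.mem_singleton] at hb
    subst hb
    simp [List.mem_filter] at ha

lemma mem_pvA_iff (l : List (List Int)) (p : List Int) (x : Int) :
    x ∈ pvA l p ↔ pvQual l p x = true := by
  unfold pvA
  rw [List.mem_filter, mem_pvLastOrder]
  constructor
  · exact fun h => h.2
  · intro h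
    refine ⟨?_, h⟩
    have : p.count x % 2 == 1 := by
      unfold pvQual at h
      exact (Bool.and_eq_true .. |>.mp h).2
    have hc : p.count x ≠ 0 := by
      intro h0; rw [h0] at this; simp at this
    exact List.count_pos_iff.mp (Nat.pos_of_ne_zero hc)

-- pvA after one more occurrence: move-to-end, then keep x iff it now qualifies
lemma pvA_append (l : List (List Int)) (p : List Int) (x : Int) :
    pvA l (p ++ [x]) =
      (pvA l p).filter (fun y => !(y == x)) ++
        (if pvQual l (p ++ [x]) x then [x] else []) := by
  unfold pvA
  rw [pvLastOrder_append, List.filter_append]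
  have hx : List.filter (pvQual l (p ++ [x])) [x]
      = (if pvQual l (p ++ [x]) x then [x] else []) := by
    cases h : pvQual l (p ++ [x]) x <;> simp [List.filter, h]
  rw [hx, List.filter_filter]
  congr 1
  rw [List.filter_filter]
  apply List.filter_congr
  intro y hy
  by_cases hxy : y = x
  · subst hxy; simp
  · have hb : (y == x) = false := beq_eq_false_iff_ne.mpr hxy
    have hcount : (p ++ [x]).count y = p.count y := by
      rw [List.count_append]
      simp [List.count_singleton, Ne.symm hxy]
    simp [pvQual, hb, hcount, Bool.and_comm]

lemma pvA_fold (l : List (List Int)) (p : List Int) :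
    p.foldl (fun g x => pvInnerA x l g 0) [] = pvA l p := by
  induction p using List.reverseRecOn with
  | nil => simp [pvA, pvLastOrder]
  | append_singleton p x ih =>
    rw [List.foldl_append, ih, pvA_append]
    simp only [List.foldl_cons, List.foldl_nil]
    by_cases hq : pvQual l p x = true
    · have hmem : x ∈ pvA l p := (mem_pvA_iff l p x).mpr hq
      have hcl : pvCl l x = 1 := by
        have := (Bool.and_eq_true .. |>.mp hq).1
        simpa [pvCl] using this
      rw [pvInnerA_of_mem x l (pvA l p) 0 hmem, if_neg (by unfold pvCl at hcl; omega)]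
      have hq' : pvQual l (p ++ [x]) x = false := by
        have hodd := (Bool.and_eq_true .. |>.mp hq).2
        simp only [pvQual, List.count_append, List.count_singleton]
        have : (p.count x + 1) % 2 = 0 := by
          have : p.count x % 2 = 1 := by simpa using hodd
          omega
        simp [this]
      rw [hq']
      simp
    · have hmem : x ∉ pvA l p := fun h => hq ((mem_pvA_iff l p x).mp h)
      rw [pvInnerA_of_not_mem x l (pvA l p) hmem]
      rw [pv_filter_ne_of_not_mem _ _ hmem]
      by_cases hcl : pvCl l x = 1
      · have hodd : (p.count x % 2 == 1) = false := by
          by_contra hb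
          apply hq
          simp only [pvQual, hcl]
          simp only [Bool.not_eq_false] at hb
          simp [hb]
        have hq' : pvQual l (p ++ [x]) x = true := by
          simp only [pvQual, hcl, List.count_append, List.count_singleton]
          have : p.count x % 2 = 0 := by
            rcases Nat.mod_two_eq_zero_or_one (p.count x) with h | h
            · exact h
            · exfalso; rw [h] at hodd; simp at hodd
          have h1 : (p.count x + 1) % 2 = 1 := by omega
          simp [h1]
        rw [if_pos (by exact hcl), hq']
        simp
      · have hq' : pvQual l (p ++ [x]) x = false := by
          simp only [pvQual]
          have : (pvCl l x == 1) = false := by simpa using hcl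
          simp [this]
        rw [if_neg (by exact hcl), hq']
        simp

lemma pvA_Ex8_eq (l : List (List Int)) : A_Ex8 l = pvA l (l.flatMap id) := by
  unfold A_Ex8
  rw [pv_foldl_flatten]
  exact pvA_fold l (l.flatMap id)

lemma pvAnn_cons (sub : List Int) (rest : List (List Int)) (n : Int) :
    pvAnn (sub :: rest) n = sub.map (fun x => (n, x)) ++ pvAnn rest (n + 1) := by
  simp [pvAnn, PySem.List.enumerate_cons]

lemma pvAnn_snd (l : List (List Int)) (n : Int) :
    (pvAnn l n).map Prod.snd = l.flatMap id := by
  induction l generalizing n with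
  | nil => simp [pvAnn, PySem.List.enumerate]
  | cons sub rest ih =>
    rw [pvAnn_cons]
    simp [List.map_append, List.map_map, ih, Function.comp_def]

lemma pvAnn_nonneg (l : List (List Int)) (n : Int) (hn : 0 ≤ n) :
    ∀ p ∈ pvAnn l n, 0 ≤ p.1 := by
  induction l generalizing n with
  | nil => simp [pvAnn, PySem.List.enumerate]
  | cons sub rest ih =>
    rw [pvAnn_cons]
    intro p hp
    rcases List.mem_append.mp hp with h | h
    · rcases List.mem_map.mp h with ⟨y, _, rfl⟩
      exact hn
    · exact ih (n + 1) (by omega) p h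

lemma pv_enum_fold (es : List (Int × List Int)) (d : PySem.Dict Int (Int × Int)) :
    es.foldl (fun info p => p.2.foldl (fun info x => pvStepB info (p.1, x)) info) d
      = (es.flatMap (fun p => p.2.map (fun x => (p.1, x)))).foldl pvStepB d := by
  induction es generalizing d with
  | nil => rfl
  | cons e rest ih =>
    simp only [List.foldl_cons, List.flatMap_cons, List.foldl_append, ih, List.foldl_map]

lemma pvB_eq_fold (l : List (List Int)) :
    A_Ex8_alt l =
      ((pvAnn l 0).foldl pvStepB PySem.Dict.empty).items.foldl
        (fun s pc =>
          if pc.2.1 != -1 && PySem.Int.mod pc.2.2 2 == 1 then PySem.Set.add s pc.1 else s)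
        [] := by
  show ((PySem.List.enumerate l).foldl
      (fun info p => p.2.foldl (fun info x => pvStepB info (p.1, x)) info)
      PySem.Dict.empty).items.foldl
        (fun s pc =>
          if pc.2.1 != -1 && PySem.Int.mod pc.2.2 2 == 1 then PySem.Set.add s pc.1 else s)
        PySem.Set.empty = _
  rw [pv_enum_fold]
  rfl

lemma pv_find?_beq (ys : List Int) (x : Int) :
    ys.find? (fun y => y == x) = if x ∈ ys then some x else none := by
  induction ys with
  | nil => simp
  | cons y ys ih =>
    by_cases h : y = x
    · subst h; simp
    · have hb : (y == x) = false := beq_eq_false_iff_ne.mpr h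
      simp [List.find?, hb, ih, Ne.symm h, h]

lemma pvIdxs_append_ne (q : List (Int × Int)) (i x y : Int) (h : y ≠ x) :
    pvIdxs (q ++ [(i, x)]) y = pvIdxs q y := by
  unfold pvIdxs
  rw [List.filter_append]
  have hb : (x == y) = false := beq_eq_false_iff_ne.mpr (Ne.symm h)
  simp [hb]

lemma pvIdxs_append_self (q : List (Int × Int)) (i x : Int) :
    pvIdxs (q ++ [(i, x)]) x = pvIdxs q x ++ [i] := by
  unfold pvIdxs
  rw [List.filter_append]
  simp

lemma pvIdxs_eq_nil_iff (q : List (Int × Int)) (x : Int) :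
    pvIdxs q x = [] ↔ x ∉ q.map Prod.snd := by
  unfold pvIdxs
  rw [List.map_eq_nil_iff, List.filter_eq_nil_iff]
  constructor
  · intro h hx
    rcases List.mem_map.mp hx with ⟨p, hp, hps⟩
    exact h p hp (by simp [hps])
  · intro h p hp hbeq
    exact h (List.mem_map.mpr ⟨p, hp, by simpa using hbeq⟩)

lemma pvB_fold_items (q : List (Int × Int)) (hq : ∀ p ∈ q, 0 ≤ p.1) :
    (q.foldl pvStepB PySem.Dict.empty).items
      = (pvLastOrder (q.map Prod.snd)).map
          (fun x => (x, pvOwner q x, ((q.map Prod.snd).count x : Int))) := by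
  induction q using List.reverseRecOn with
  | nil => rfl
  | append_singleton q a ih =>
    obtain ⟨i, x⟩ := a
    have hi : (0 : Int) ≤ i := hq (i, x) (by simp)
    have hq' : ∀ p ∈ q, 0 ≤ p.1 := fun p hp => hq p (by simp [hp])
    have IH := ih hq'
    set d := q.foldl pvStepB PySem.Dict.empty with hd
    set s := q.map Prod.snd with hs
    set h := (fun y => (y, pvOwner q y, ((s.count y : Int)))) with hh
    rw [List.foldl_append, List.foldl_cons, List.foldl_nil]
    -- the dictionary lookup before the update
    have hget : d.get? x = if x ∈ s then some (pvOwner q x, (s.count x : Int)) else none := by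
      show Option.map Prod.snd (d.items.find? (fun p => p.1 == x)) = _
      rw [IH]
      rw [List.find?_map]
      have hco : ((fun p : Int × Int × Int => p.1 == x) ∘ h) = fun y => y == x := rfl
      rw [hco, pv_find?_beq]
      by_cases hx : x ∈ s
      · rw [if_pos ((mem_pvLastOrder s x).mpr hx), if_pos hx]
        rfl
      · rw [if_neg (fun hl => hx ((mem_pvLastOrder s x).mp hl)), if_neg hx]
        rfl
    -- the erase step filters the items
    have herase : (d.erase x).items
        = ((pvLastOrder s).filter (fun y => !(y == x))).map h := by
      show d.items.filter (fun p => !(p.1 == x)) = _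
      rw [IH, List.filter_map]
      rfl
    have hcont : (d.erase x).contains x = false := by
      show ((d.erase x).items.any (fun p => p.1 == x)) = false
      rw [herase]
      simp only [List.any_map, List.any_eq_false]
      intro y hy
      rcases List.mem_filter.mp hy with ⟨-, hne⟩
      simpa using hne
    have hinsert := PySem.Dict.items_insert_of_not_contains (d := d.erase x)
      (k := x) (v := ((if ((d.get? x).getD ((i : Int), 0)).1 == i then i else -1,
        ((d.get? x).getD ((i : Int), 0)).2 + 1))) hcont
    show ((d.erase x).insert x _).items = _
    rw [hinsert, herase]
    -- the right-hand side
    have hsnd : (q ++ [(i, x)]).map Prod.snd = s ++ [x] := by simp [hs]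
    rw [hsnd, pvLastOrder_append, List.map_append]
    congr 1
    · -- untouched entries keep owner and count
      apply List.map_congr_left
      intro y hy
      rcases List.mem_filter.mp hy with ⟨-, hne⟩
      have hyx : y ≠ x := by simpa using hne
      have hown : pvOwner (q ++ [(i, x)]) y = pvOwner q y := by
        unfold pvOwner
        rw [pvIdxs_append_ne q i x y hyx]
      have hcnt : (s ++ [x]).count y = s.count y := by
        rw [List.count_append]
        simp [Ne.symm hyx]
      rw [hown, hcnt]
    · -- the moved-to-end entry gets the updated owner and count
      simp only [List.map_cons, List.map_nil]
      have hcnt : (s ++ [x]).count x = s.count x + 1 := by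
        rw [List.count_append]
        simp
      have hidx' : pvIdxs (q ++ [(i, x)]) x = pvIdxs q x ++ [i] :=
        pvIdxs_append_self q i x
      by_cases hx : x ∈ s
      · have hne : pvIdxs q x ≠ [] := by
          rw [Ne, pvIdxs_eq_nil_iff]
          simpa [hs] using hx
        obtain ⟨jj, rest, hjr⟩ : ∃ jj rest, pvIdxs q x = jj :: rest := by
          cases hcase : pvIdxs q x with
          | nil => exact absurd hcase hne
          | cons jj rest => exact ⟨jj, rest, rfl⟩
        have hoq : pvOwner q x = if rest.all (fun j => j == jj) then jj else -1 := by
          unfold pvOwner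
          rw [hjr]
        have hoq' : pvOwner (q ++ [(i, x)]) x
            = if (rest ++ [i]).all (fun j => j == jj) then jj else -1 := by
          unfold pvOwner
          rw [hidx', hjr]
          rfl
        rw [hget, if_pos hx]
        simp only [Option.getD_some]
        rw [hcnt, hoq']
        push_cast
        congr 1
        rw [List.all_append, hoq]
        by_cases hall : rest.all (fun j => j == jj) = true
        · rw [hall]
          simp only [Bool.true_and, if_true, List.all_cons, List.all_nil, Bool.and_true]
          by_cases hij : jj = i
          · subst hij
            simp
          · have h1 : (jj == i) = false := beq_eq_false_iff_ne.mpr hij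
            have h2 : (i == jj) = false := beq_eq_false_iff_ne.mpr (Ne.symm hij)
            simp [h1, h2]
        · have hall' : rest.all (fun j => j == jj) = false := by simpa using hall
          rw [hall']
          have hm1 : ((-1 : Int) == i) = false := by
            apply beq_eq_false_iff_ne.mpr
            omega
          simp [hm1]
      · have hnil : pvIdxs q x = [] := by
          rw [pvIdxs_eq_nil_iff]
          simpa [hs] using hx
        have hoq' : pvOwner (q ++ [(i, x)]) x = i := by
          unfold pvOwner
          rw [hidx', hnil]
          simp
        have hc0 : s.count x = 0 := List.count_eq_zero.mpr hx
        rw [hget, if_neg hx]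
        simp only [Option.getD_none]
        rw [hcnt, hoq', hc0]
        simp

lemma pv_foldl_add_if (M : List (Int × (Int × Int))) (cond : Int × (Int × Int) → Bool)
    (s : List Int) (h : (s ++ M.map Prod.fst).Nodup) :
    M.foldl (fun s pc => if cond pc then PySem.Set.add s pc.1 else s) s
      = s ++ (M.filter cond).map Prod.fst := by
  induction M generalizing s with
  | nil => simp
  | cons pc rest ih =>
    simp only [List.foldl_cons, List.filter_cons]
    by_cases hc : cond pc = true
    · have hpc : pc.1 ∉ s := by
        intro hmem
        have hd := List.disjoint_of_nodup_append h
        exact hd hmem (by simp)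
      have hadd : PySem.Set.add s pc.1 = s ++ [pc.1] := PySem.Set.add_of_not_mem hpc
      have hnd : ((s ++ [pc.1]) ++ rest.map Prod.fst).Nodup := by
        rw [← List.append_cons]
        simpa using h
      rw [hc, if_pos rfl, hadd, ih (s ++ [pc.1]) hnd]
      simp
    · have hc' : cond pc = false := by simpa using hc
      have hsub : (s ++ rest.map Prod.fst).Sublist (s ++ pc.1 :: rest.map Prod.fst) :=
        List.Sublist.append_left (List.sublist_cons_self _ _) s
      have hnd : (s ++ rest.map Prod.fst).Nodup := h.sublist hsub
      rw [hc']
      simp only [Bool.false_eq_true, if_false]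
      exact ih s hnd

lemma pvIdxs_ann_cons (sub : List Int) (rest : List (List Int)) (n x : Int) :
    pvIdxs (pvAnn (sub :: rest) n) x
      = List.replicate (sub.count x) n ++ pvIdxs (pvAnn rest (n + 1)) x := by
  unfold pvIdxs
  rw [pvAnn_cons, List.filter_append, List.map_append]
  congr 1
  rw [List.filter_map]
  have hp : ((fun p => p.2 == x) ∘ fun y => ((n : Int), y)) = (fun y => y == x) := rfl
  rw [hp, List.filter_beq, List.map_map, List.map_replicate]
  rfl

lemma pv_contains_count (sub : List Int) (x : Int) :
    sub.contains x = true ↔ sub.count x ≠ 0 := by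
  rw [List.contains_iff_mem]
  constructor
  · intro h
    have := List.count_pos_iff.mpr h
    omega
  · intro h; exact List.count_pos_iff.mp (Nat.pos_of_ne_zero h)

lemma pvIdxs_ann_nil_iff (l : List (List Int)) (n x : Int) :
    pvIdxs (pvAnn l n) x = [] ↔ pvCl l x = 0 := by
  induction l generalizing n with
  | nil => simp [pvIdxs, pvAnn, PySem.List.enumerate, pvCl]
  | cons sub rest ih =>
    rw [pvIdxs_ann_cons, List.append_eq_nil_iff]
    unfold pvCl
    rw [List.countP_cons]
    constructor
    · rintro ⟨h1, h2⟩
      have hc : sub.count x = 0 := by simpa using congrArg List.length h1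
      have hcont : sub.contains x = false := by
        by_contra hb
        exact absurd hc ((pv_contains_count sub x).mp (by simpa using hb))
      have hr := (ih (n + 1)).mp h2
      unfold pvCl at hr
      simp only [hcont, Bool.false_eq_true, if_false, hr]
    · intro h
      by_cases hcont : sub.contains x = true
      · simp only [hcont, if_true] at h
        omega
      · have hcont' : sub.contains x = false := by simpa using hcont
        simp only [hcont', Bool.false_eq_true, if_false] at h
        have hc : sub.count x = 0 := by
          by_contra hcc
          exact hcont ((pv_contains_count sub x).mpr hcc)
        exact ⟨by rw [hc]; rfl, (ih (n + 1)).mpr (by unfold pvCl; omega)⟩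

lemma pvIdxs_ann_lb (l : List (List Int)) (n x : Int) :
    ∀ j ∈ pvIdxs (pvAnn l n) x, n ≤ j := by
  induction l generalizing n with
  | nil => simp [pvIdxs, pvAnn, PySem.List.enumerate]
  | cons sub rest ih =>
    rw [pvIdxs_ann_cons]
    intro j hj
    rcases List.mem_append.mp hj with h | h
    · rw [List.eq_of_mem_replicate h]
    · have := ih (n + 1) j h
      omega

lemma pvOwner_spec (l : List (List Int)) (x : Int) (n : Int) (hn : 0 ≤ n) :
    (pvOwner (pvAnn l n) x ≠ -1 ∧ pvIdxs (pvAnn l n) x ≠ []) ↔ pvCl l x = 1 := by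
  induction l generalizing n with
  | nil =>
    have hnil : pvIdxs (pvAnn [] n) x = [] := by
      simp [pvIdxs, pvAnn, PySem.List.enumerate]
    simp [hnil, pvCl]
  | cons sub rest ih =>
    by_cases hc : sub.count x = 0
    · have hcont : sub.contains x = false := by
        by_contra hb
        exact absurd hc ((pv_contains_count sub x).mp (by simpa using hb))
      have hidx : pvIdxs (pvAnn (sub :: rest) n) x = pvIdxs (pvAnn rest (n + 1)) x := by
        rw [pvIdxs_ann_cons, hc]
        simp
      have hown : pvOwner (pvAnn (sub :: rest) n) x = pvOwner (pvAnn rest (n + 1)) x := by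
        unfold pvOwner
        rw [hidx]
      have hcl : pvCl (sub :: rest) x = pvCl rest x := by
        unfold pvCl
        rw [List.countP_cons_of_neg (by simpa using hcont)]
      rw [hown, hidx, hcl]
      exact ih (n + 1) (by omega)
    · obtain ⟨c, hcc⟩ : ∃ c, sub.count x = c + 1 := ⟨sub.count x - 1, by omega⟩
      have hcont : sub.contains x = true := (pv_contains_count sub x).mpr hc
      have hidx : pvIdxs (pvAnn (sub :: rest) n) x
          = n :: (List.replicate c n ++ pvIdxs (pvAnn rest (n + 1)) x) := by
        rw [pvIdxs_ann_cons, hcc, List.replicate_succ]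
        rfl
      have hall : ((List.replicate c n ++ pvIdxs (pvAnn rest (n + 1)) x).all
          (fun j => j == n) = true) ↔ pvIdxs (pvAnn rest (n + 1)) x = [] := by
        rw [List.all_append]
        constructor
        · intro h
          have h2 := (Bool.and_eq_true .. |>.mp h).2
          apply List.eq_nil_iff_forall_not_mem.mpr
          intro j hj
          have hlb := pvIdxs_ann_lb rest (n + 1) x j hj
          have : (j == n) = true := by
            rw [List.all_eq_true] at h2
            exact h2 j hj
          have : j = n := by simpa using this
          omega
        · intro h
          rw [h]
          simp [List.all_replicate]
      have hcl : pvCl (sub :: rest) x = pvCl rest x + 1 :=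
        List.countP_cons_of_pos hcont
      have hclrest := pvIdxs_ann_nil_iff rest (n + 1) x
      unfold pvOwner
      rw [hidx, hcl]
      by_cases hall2 : (List.replicate c n ++ pvIdxs (pvAnn rest (n + 1)) x).all
          (fun j => j == n) = true
      · have hrestnil := hall.mp hall2
        have : pvCl rest x = 0 := hclrest.mp hrestnil
        simp only [hall2, if_true]
        constructor
        · intro _; omega
        · intro _; exact ⟨by omega, by simp⟩
      · have hall2' : (List.replicate c n ++ pvIdxs (pvAnn rest (n + 1)) x).all
            (fun j => j == n) = false := by simpa using hall2
        have hrestne : pvIdxs (pvAnn rest (n + 1)) x ≠ [] := fun h => hall2 (hall.mpr h)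
        have : pvCl rest x ≠ 0 := fun h => hrestne (hclrest.mpr h)
        simp only [hall2']
        constructor
        · rintro ⟨h1, -⟩; exact absurd rfl h1
        · intro h; omega

-- ===== VERDICT (by name: the statement is the Claim_ definition above) =====
theorem A_Ex8_spec : Claim_equal_A_Ex8 := by
  intro l _
  unfold Spec_A_Ex8
  rw [pvA_Ex8_eq, pvB_eq_fold]
  rw [pvB_fold_items (pvAnn l 0) (pvAnn_nonneg l 0 le_rfl)]
  rw [pvAnn_snd l 0]
  set flat := l.flatMap id with hf
  set h := (fun x => (x, pvOwner (pvAnn l 0) x, ((flat.count x : Int)))) with hh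
  have hid : (Prod.fst ∘ h) = id := rfl
  have hnd : (([] : List Int)
      ++ ((pvLastOrder flat).map h).map Prod.fst).Nodup := by
    rw [List.nil_append, List.map_map, hid, List.map_id]
    exact nodup_pvLastOrder flat
  rw [pv_foldl_add_if _ _ [] hnd, List.nil_append, List.filter_map, List.map_map,
    hid, List.map_id]
  unfold pvA
  apply List.filter_congr
  intro x hx
  have hxf : x ∈ flat := (mem_pvLastOrder flat x).mp hx
  have hcl0 : pvCl l x ≠ 0 := by
    rcases List.mem_flatMap.mp hxf with ⟨sub, hsub, hxs⟩
    have : 0 < pvCl l x := by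
      unfold pvCl
      rw [List.countP_pos_iff]
      exact ⟨sub, hsub, by simpa [List.contains_iff_mem] using hxs⟩
    omega
  have hneidx : pvIdxs (pvAnn l 0) x ≠ [] := by
    rw [Ne, pvIdxs_ann_nil_iff]
    exact hcl0
  have hospec := pvOwner_spec l x 0 le_rfl
  have b1 : (pvOwner (pvAnn l 0) x != -1) = (pvCl l x == 1) := by
    apply Bool.eq_iff_iff.mpr
    rw [bne_iff_ne, beq_iff_eq]
    constructor
    · intro hne
      exact hospec.mp ⟨hne, hneidx⟩
    · intro hcl
      exact (hospec.mpr hcl).1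
  have b2 : (PySem.Int.mod ((flat.count x : Int)) 2 == 1) = (flat.count x % 2 == 1) := by
    have hm : PySem.Int.mod ((flat.count x : Int)) 2 = ((flat.count x % 2 : Nat) : Int) := by
      simp [PySem.Int.mod, Int.fmod_eq_emod]
    rw [hm]
    apply Bool.eq_iff_iff.mpr
    simp only [beq_iff_eq]
    constructor <;> (intro hh2; omega)
  show pvQual l flat x = ((h x).2.1 != -1 && (PySem.Int.mod (h x).2.2 2 == 1))
  unfold pvQual
  rw [hh]
  rw [b1, b2]
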